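-- pv_equiv track=rewrite | github.com/JBKing514/AutoEhHunter | Docker/main/webapi/main.py | _extract_source_urls
-- ===== SOURCE A (Python) =====
-- def _extract_source_urls(tags: list[str]) -> tuple[str, str]:
--     eh_url = ""
--     ex_url = ""
--     for tag in tags or []:
--         s = str(tag or "").strip()
--         if not s.lower().startswith("source:"):
--             continue
--         v = s.split(":", 1)[1].strip()
--         if not v:
--             continue
--         if not v.startswith("http://") and not v.startswith("https://"):
--             v = f"https://{v}"
--         if "exhentai.org" in v:
--             ex_url = ex_url or v
--         elif "e-hentai.org" in v:
--             eh_url = eh_url or v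
--     return eh_url, ex_url
-- ===== SOURCE B (Python) =====
-- def _extract_source_urls(tags: list[str]) -> tuple[str, str]:
--     def norm(tag):
--         s = str(tag or "").strip()
--         if not s.lower().startswith("source:"):
--             return None
--         v = s.split(":", 1)[1].strip()
--         if not v:
--             return None
--         if not (v.startswith("http://") or v.startswith("https://")):
--             v = "https://" + v
--         return v
--     srcs = [u for u in map(norm, tags or []) if u is not None]
--     ex_url = next((u for u in srcs if "exhentai.org" in u), "")
--     eh_url = next((u for u in srcs if "e-hentai.org" in u and "exhentai.org" not in u), "")
--     return eh_url, ex_url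
-- ===== Notes on version B (the rewrite author's own statement) =====
-- stated objective: alternative
-- what changed: Replaced the single stateful loop with two 'first non-empty wins' accumulators by a normalize-then-search pipeline: one pass builds the list of normalized source URLs, then each result is the first matching URL (exhentai wins over e-hentai per value, mirroring the elif).
import Mathlib
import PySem

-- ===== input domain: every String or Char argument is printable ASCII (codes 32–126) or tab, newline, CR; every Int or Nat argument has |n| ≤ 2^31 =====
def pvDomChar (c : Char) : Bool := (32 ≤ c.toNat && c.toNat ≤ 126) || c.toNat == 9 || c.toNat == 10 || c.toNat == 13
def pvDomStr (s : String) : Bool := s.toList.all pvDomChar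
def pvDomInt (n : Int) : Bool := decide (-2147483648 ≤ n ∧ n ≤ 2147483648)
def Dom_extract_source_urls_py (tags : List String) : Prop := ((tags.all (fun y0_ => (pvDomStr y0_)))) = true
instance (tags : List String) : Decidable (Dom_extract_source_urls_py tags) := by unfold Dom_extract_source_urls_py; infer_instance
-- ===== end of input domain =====

-- ===== PORT A =====
-- B replaces A's single stateful loop (two 'first non-empty wins' accumulators) by a
-- normalize-then-search pipeline; same O(n) cost, different decomposition.
-- Shared per-tag subexpressions of A's loop body, named (s, v before and after the https:// prefix step):
def pvS (tag : String) : String := PySem.Str.strip (if tag = "" then "" else tag)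
def pvV0 (tag : String) : String :=
  PySem.Str.strip (((PySem.Str.splitMax? (pvS tag) ":" 1).getD []).getD 1 "")
def pvV (tag : String) : String :=
  if ¬ PySem.Str.startswith (pvV0 tag) "http://" ∧ ¬ PySem.Str.startswith (pvV0 tag) "https://"
  then "https://" ++ pvV0 tag else pvV0 tag

-- the loop body of A (one iteration over the running (eh_url, ex_url) pair)
def pvStep (acc : String × String) (tag : String) : String × String :=
  if ¬ PySem.Str.startswith (PySem.Str.lower (pvS tag)) "source:" then acc
  else if pvV0 tag = "" then acc
  else if PySem.Str.isIn "exhentai.org" (pvV tag) then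
    (acc.1, if acc.2 = "" then pvV tag else acc.2)
  else if PySem.Str.isIn "e-hentai.org" (pvV tag) then
    (if acc.1 = "" then pvV tag else acc.1, acc.2)
  else acc

def extract_source_urls_py (tags : List String) : String × String :=
  tags.foldl pvStep ("", "")

-- ===== PORT B =====
-- Source B's norm(tag): None for a non-source/empty tag, otherwise the normalized URL
-- (Source B writes the prefix test as 'not (v.startswith("http://") or v.startswith("https://"))')
def pvNorm (tag : String) : Option String :=
  if ¬ PySem.Str.startswith (PySem.Str.lower (pvS tag)) "source:" then none
  else if pvV0 tag = "" then none
  else some (if ¬ (PySem.Str.startswith (pvV0 tag) "http://"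
                   || PySem.Str.startswith (pvV0 tag) "https://") = true
             then "https://" ++ pvV0 tag else pvV0 tag)

def extract_source_urls_py_alt (tags : List String) : String × String :=
  let srcs := tags.filterMap pvNorm
  let ex_url := (srcs.find? (fun u => PySem.Str.isIn "exhentai.org" u)).getD ""
  let eh_url := (srcs.find? (fun u =>
      PySem.Str.isIn "e-hentai.org" u && !PySem.Str.isIn "exhentai.org" u)).getD ""
  (eh_url, ex_url)

-- ===== PRECONDITION & SPEC =====
def Spec_extract_source_urls_py (tags : List String) (out : String × String) : Prop := out = extract_source_urls_py_alt tags
instance (tags : List String) (out : String × String) : Decidable (Spec_extract_source_urls_py tags out) := by unfold Spec_extract_source_urls_py; infer_instance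

-- ===== CLAIM (what is proved, stated in full; the proofs are below) =====
def Claim_equal_extract_source_urls_py : Prop := ∀ (tags : List String), Dom_extract_source_urls_py tags → Spec_extract_source_urls_py tags (extract_source_urls_py tags)

-- ===== LEMMAS AND PROOFS =====

lemma pvNorm_eq_some (tag : String)
    (h1 : PySem.Str.startswith (PySem.Str.lower (pvS tag)) "source:" = true)
    (h2 : pvV0 tag ≠ "") : pvNorm tag = some (pvV tag) := by
  unfold pvNorm pvV
  simp only [h1, h2]
  by_cases hp : PySem.Str.startswith (pvV0 tag) "http://" = true <;>
    by_cases hq : PySem.Str.startswith (pvV0 tag) "https://" = true <;>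
      simp at hp hq <;>
      simp

lemma step_of_norm (acc : String × String) (tag : String) :
    pvStep acc tag = match pvNorm tag with
      | none => acc
      | some v =>
        if PySem.Str.isIn "exhentai.org" v then
          (acc.1, if acc.2 = "" then v else acc.2)
        else if PySem.Str.isIn "e-hentai.org" v then
          (if acc.1 = "" then v else acc.1, acc.2)
        else acc := by
  by_cases h1 : PySem.Str.startswith (PySem.Str.lower (pvS tag)) "source:" = true
  · by_cases h2 : pvV0 tag = ""
    · have h1' := h1
      simp at h1'
      simp [pvStep, pvNorm, h1', h2]
    · rw [pvNorm_eq_some tag h1 h2]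
      have h1' := h1
      simp at h1'
      simp [pvStep, h1', h2]
  · have h1' := h1
    simp at h1'
    simp [pvStep, pvNorm, h1']

lemma isIn_ne_empty (sub u : String) (hs : sub.toList ≠ [])
    (h : PySem.Str.isIn sub u = true) : u ≠ "" := by
  intro he; subst he
  rw [PySem.Str.isIn_iff_infix] at h
  simp_all

lemma loop_inv (tags : List String) (eh ex : String) :
    tags.foldl pvStep (eh, ex) =
      ((if eh = "" then ((tags.filterMap pvNorm).find? (fun u =>
          PySem.Str.isIn "e-hentai.org" u && !PySem.Str.isIn "exhentai.org" u)).getD "" else eh),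
       (if ex = "" then ((tags.filterMap pvNorm).find? (fun u =>
          PySem.Str.isIn "exhentai.org" u)).getD "" else ex)) := by
  induction tags generalizing eh ex with
  | nil => simp
  | cons t ts ih =>
    rw [List.foldl_cons, List.filterMap_cons, step_of_norm (eh, ex) t]
    cases hn : pvNorm t with
    | none => simp [ih]
    | some v =>
      by_cases hex : PySem.Str.isIn "exhentai.org" v = true
      · have hv : v ≠ "" := isIn_ne_empty _ _ (by decide) hex
        have hex' := hex
        simp at hex'
        by_cases he : ex = "" <;>
          simp [hex', he, hv, ih]
      · by_cases heh : PySem.Str.isIn "e-hentai.org" v = true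
        · have hv : v ≠ "" := isIn_ne_empty _ _ (by decide) heh
          have hex' := hex
          have heh' := heh
          simp at hex' heh'
          by_cases he : eh = "" <;>
            simp [hex', heh', he, hv, ih]
        · have hex' := hex
          have heh' := heh
          simp at hex' heh'
          simp [hex', heh', ih]

-- ===== VERDICT (by name: the statement is the Claim_ definition above) =====
theorem extract_source_urls_py_spec : Claim_equal_extract_source_urls_py := by
  intro tags _
  unfold Spec_extract_source_urls_py extract_source_urls_py extract_source_urls_py_alt
  rw [loop_inv]
  simp
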